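-- pv_equiv track=rewrite | github.com/Klaudia1303/student_code_analysis | Progetto-tirocinio2024/data/student_data/2086837_Vitali/LabPython08/A_Ex1.py | A_Ex1
-- ===== SOURCE A (Python) =====
-- def A_Ex1(l):
--     appo=''
--     occmax=0
--     cmax='a'
--     for i in range(len(l)):
--         appo=l[i]
--         for j in range(len(appo)):
--             occ=0
--             if appo[j]==appo[j].lower() and appo[j].isalpha()==True:
--                 occ+=1
--                 for k in range(i,len(l)):
--                     appo2=l[k]
--                     if appo2.find(appo[j])!=-1:
--                         occ+=1
--                 if occ>occmax:
--                     occmax=occ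
--                     cmax=appo[j]
--                 elif occ==occmax and appo[j]>cmax:
--                     occmax=occ
--                     cmax=appo[j]
--     return cmax
-- ===== SOURCE B (Python) =====
-- def A_Ex1(l):
--     best = (0, 'a')
--     for c in "abcdefghijklmnopqrstuvwxyz":
--         n = 0
--         for s in l:
--             if c in s:
--                 n += 1
--         if n > 0 and (n > best[0] or (n == best[0] and c > best[1])):
--             best = (n, c)
--     return best[1]
-- ===== Notes on version B (the rewrite author's own statement) =====
-- stated objective: faster
-- what changed: B replaces A's triple nested loop (for every lowercase-character occurrence, a fresh rescan of all remaining strings) by a single loop over the 26 lowercase letters that counts, once per letter, how many strings contain it and keeps the lexicographic maximum of (count, letter).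
import Mathlib
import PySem

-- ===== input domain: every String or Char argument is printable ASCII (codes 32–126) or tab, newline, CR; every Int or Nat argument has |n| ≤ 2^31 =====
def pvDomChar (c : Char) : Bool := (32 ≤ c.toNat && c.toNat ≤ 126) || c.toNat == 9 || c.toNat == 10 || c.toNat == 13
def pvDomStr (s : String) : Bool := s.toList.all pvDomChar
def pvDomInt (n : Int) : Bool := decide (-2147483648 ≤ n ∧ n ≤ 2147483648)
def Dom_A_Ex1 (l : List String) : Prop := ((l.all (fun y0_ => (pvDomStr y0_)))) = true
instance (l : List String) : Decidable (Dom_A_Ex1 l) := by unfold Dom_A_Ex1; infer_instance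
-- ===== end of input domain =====

-- B rewrites A's per-occurrence suffix rescans as one containment count per alphabet letter (objective: faster).

-- ===== PORT A =====
-- body of A's outer 'for i in range(len(l))' loop, state (occmax, cmax)
def A_Ex1_body (l : List String) (st : Int × Char) (i : Int) : Int × Char :=
  let appo := PySem.List.pyGetD l i ""
  (PySem.List.pyRange 0 (PySem.List.len appo.toList)).foldl
    (fun (st : Int × Char) j =>
      let cj := PySem.List.pyGetD appo.toList j ' '
      if cj == PySem.Chars.lowerChar cj && PySem.Chars.isalpha cj then
        -- occ = 0; occ += 1; then 'for k in range(i, len(l))'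
        let occ : Int :=
          (PySem.List.pyRange i (PySem.List.len l)).foldl
            (fun (occ : Int) k =>
              let appo2 := PySem.List.pyGetD l k ""
              if PySem.Str.find appo2 (String.singleton cj) != -1 then occ + 1 else occ)
            (0 + 1)
        if occ > st.1 then (occ, cj)
        else if occ == st.1 && cj > st.2 then (occ, cj)
        else st
      else st)
    st

def A_Ex1 (l : List String) : String :=
  String.singleton (((PySem.List.pyRange 0 (PySem.List.len l)).foldl (A_Ex1_body l) ((0 : Int), 'a')).2)

-- ===== PORT B =====
def A_Ex1_alt (l : List String) : String :=
  let best :=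
    "abcdefghijklmnopqrstuvwxyz".toList.foldl
      (fun (best : Int × Char) c =>
        let n : Int :=
          l.foldl (fun (n : Int) s => if PySem.Str.isIn (String.singleton c) s then n + 1 else n) 0
        if n > 0 && (n > best.1 || (n == best.1 && c > best.2)) then (n, c) else best)
      ((0 : Int), 'a')
  String.singleton best.2

-- ===== PRECONDITION & SPEC =====
def Spec_A_Ex1 (l : List String) (out : String) : Prop := out = A_Ex1_alt l
instance (l : List String) (out : String) : Decidable (Spec_A_Ex1 l out) := by unfold Spec_A_Ex1; infer_instance

-- ===== CLAIM (what is proved, stated in full; the proofs are below) =====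
def Claim_equal_A_Ex1 : Prop := ∀ (l : List String), Dom_A_Ex1 l → Spec_A_Ex1 l (A_Ex1 l)

-- ===== LEMMAS AND PROOFS =====

-- the test A applies to each character: lowercase letter
def pvLow (c : Char) : Bool := c == PySem.Chars.lowerChar c && PySem.Chars.isalpha c

-- number of strings of l containing c
def pvCnt (l : List String) (c : Char) : Int :=
  (l.countP (fun s => PySem.Str.isIn (String.singleton c) s) : Int)

-- lexicographic max on (count, char), as both loops update their state
def pvMax (p q : Int × Char) : Int × Char :=
  if q.1 > p.1 ∨ (q.1 = p.1 ∧ q.2 > p.2) then q else p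

def pvLe (p q : Int × Char) : Prop := p.1 < q.1 ∨ (p.1 = q.1 ∧ p.2 ≤ q.2)

def pvStep (l : List String) (st : Int × Char) (c : Char) : Int × Char :=
  if pvLow c = true then pvMax st (1 + pvCnt l c, c) else st

def pvProcA : List String → (Int × Char) → (Int × Char)
  | [], st => st
  | s :: rest, st => pvProcA rest (s.toList.foldl (pvStep (s :: rest)) st)

def pvCandA : List String → List (Int × Char)
  | [] => []
  | s :: rest => ((s.toList.filter pvLow).map (fun c => (1 + pvCnt (s :: rest) c, c))) ++ pvCandA rest

def pvAlpha : List Char := "abcdefghijklmnopqrstuvwxyz".toList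

def pvCandB (l : List String) : List (Int × Char) :=
  (pvAlpha.filter (fun c => decide (0 < pvCnt l c))).map (fun c => (pvCnt l c, c))

-- ---- basic order facts ----

lemma pvLe_refl (p : Int × Char) : pvLe p p := Or.inr ⟨rfl, le_refl _⟩

lemma pvLe_trans {p q r : Int × Char} (h1 : pvLe p q) (h2 : pvLe q r) : pvLe p r := by
  rcases h1 with h1 | ⟨h1, h1'⟩ <;> rcases h2 with h2 | ⟨h2, h2'⟩
  · exact Or.inl (by omega)
  · exact Or.inl (by omega)
  · exact Or.inl (by omega)
  · exact Or.inr ⟨by omega, le_trans h1' h2'⟩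

lemma pvLe_antisymm {p q : Int × Char} (h1 : pvLe p q) (h2 : pvLe q p) : p = q := by
  rcases h1 with h1 | ⟨h1, h1'⟩ <;> rcases h2 with h2 | ⟨h2, h2'⟩
  · omega
  · omega
  · omega
  · exact Prod.ext (by omega) (le_antisymm h1' h2')

lemma pvLe_max_left (p q : Int × Char) : pvLe p (pvMax p q) := by
  unfold pvMax
  split_ifs with h
  · rcases h with h | ⟨h, h'⟩
    · exact Or.inl h
    · exact Or.inr ⟨h.symm, le_of_lt h'⟩
  · exact pvLe_refl p

lemma pvLe_max_right (p q : Int × Char) : pvLe q (pvMax p q) := by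
  unfold pvMax
  split_ifs with h
  · exact pvLe_refl q
  · have h2 : ¬ (q.1 = p.1 ∧ p.2 < q.2) := fun hh => h (Or.inr hh)
    by_cases he : q.1 = p.1
    · exact Or.inr ⟨he, not_lt.mp (fun hlt => h2 ⟨he, hlt⟩)⟩
    · exact Or.inl (by omega)

lemma pvMax_mem (p q : Int × Char) : pvMax p q = p ∨ pvMax p q = q := by
  unfold pvMax; split_ifs <;> simp

-- ---- fold facts ----

lemma foldl_pvMax_init (xs : List (Int × Char)) (init : Int × Char) :
    pvLe init (xs.foldl pvMax init) := by
  induction xs generalizing init with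
  | nil => exact pvLe_refl init
  | cons x xs ih =>
    exact pvLe_trans (pvLe_max_left init x) (ih (pvMax init x))

lemma foldl_pvMax_le_mem {xs : List (Int × Char)} {x : Int × Char} (hx : x ∈ xs)
    (init : Int × Char) : pvLe x (xs.foldl pvMax init) := by
  induction xs generalizing init with
  | nil => cases hx
  | cons y ys ih =>
    rcases List.mem_cons.mp hx with rfl | hx'
    · exact pvLe_trans (pvLe_max_right init x) (foldl_pvMax_init ys (pvMax init x))
    · exact ih hx' (pvMax init y)

lemma foldl_pvMax_mem (xs : List (Int × Char)) (init : Int × Char) :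
    xs.foldl pvMax init = init ∨ xs.foldl pvMax init ∈ xs := by
  induction xs generalizing init with
  | nil => exact Or.inl rfl
  | cons y ys ih =>
    rw [List.foldl_cons]
    rcases ih (pvMax init y) with h | h
    · rw [h]
      rcases pvMax_mem init y with h' | h'
      · exact Or.inl h'
      · exact Or.inr (by rw [h']; exact List.mem_cons_self ..)
    · exact Or.inr (List.mem_cons_of_mem _ h)

-- ---- counting facts ----

lemma pvCnt_nonneg (l : List String) (c : Char) : 0 ≤ pvCnt l c := Int.natCast_nonneg _

lemma isIn_singleton_iff (c : Char) (s : String) :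
    PySem.Str.isIn (String.singleton c) s = true ↔ c ∈ s.toList := by
  have hh : (String.singleton c).toList = [c] := by simp
  rw [PySem.Str.isIn_iff_infix, hh]
  constructor
  · intro h
    exact List.singleton_sublist.mp h.sublist
  · intro h
    obtain ⟨u, v, huv⟩ := List.append_of_mem h
    rw [huv]
    exact ⟨u, v, by simp⟩

lemma pvCnt_cons_pos {s : String} {c : Char} (hs : c ∈ s.toList) (rest : List String) :
    pvCnt (s :: rest) c = pvCnt rest c + 1 := by
  have h := (isIn_singleton_iff c s).mpr hs
  unfold pvCnt
  rw [List.countP_cons, if_pos h]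
  push_cast
  ring

lemma pvCnt_cons_neg {s : String} {c : Char} (hs : ¬ c ∈ s.toList) (rest : List String) :
    pvCnt (s :: rest) c = pvCnt rest c := by
  have h : PySem.Str.isIn (String.singleton c) s = false :=
    Bool.eq_false_iff.mpr (fun ht => hs ((isIn_singleton_iff c s).mp ht))
  unfold pvCnt
  rw [List.countP_cons, if_neg (by rw [h]; simp)]
  simp

lemma pvCnt_cons_le (s : String) (rest : List String) (c : Char) :
    pvCnt rest c ≤ pvCnt (s :: rest) c := by
  by_cases hs : c ∈ s.toList
  · rw [pvCnt_cons_pos hs]; omega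
  · rw [pvCnt_cons_neg hs]

lemma pvCnt_head_pos {s : String} {c : Char} (hs : c ∈ s.toList) (rest : List String) :
    0 < pvCnt (s :: rest) c := by
  have := pvCnt_nonneg rest c
  rw [pvCnt_cons_pos hs]; omega

-- ---- candidate-list characterizations ----

lemma memA {l : List String} {x : Int × Char} (hx : x ∈ pvCandA l) :
    pvLow x.2 = true ∧ 0 < pvCnt l x.2 ∧ 1 ≤ x.1 ∧ x.1 ≤ 1 + pvCnt l x.2 := by
  induction l with
  | nil => cases hx
  | cons s rest ih =>
    rw [pvCandA, List.mem_append] at hx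
    rcases hx with hx | hx
    · obtain ⟨c, hc, rfl⟩ := List.mem_map.mp hx
      obtain ⟨hcs, hlow⟩ := List.mem_filter.mp hc
      have hpos := pvCnt_head_pos hcs rest
      have := pvCnt_nonneg (s :: rest) c
      exact ⟨hlow, hpos, by simp; omega, le_refl _⟩
    · obtain ⟨h1, h2, h3, h4⟩ := ih hx
      have := pvCnt_cons_le s rest x.2
      exact ⟨h1, by omega, h3, by omega⟩

lemma occ_memA {l : List String} {c : Char} (hlow : pvLow c = true)
    (hpos : 0 < pvCnt l c) : (1 + pvCnt l c, c) ∈ pvCandA l := by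
  induction l with
  | nil => simp [pvCnt] at hpos
  | cons s rest ih =>
    rw [pvCandA, List.mem_append]
    by_cases hs : c ∈ s.toList
    · exact Or.inl (List.mem_map.mpr ⟨c, List.mem_filter.mpr ⟨hs, hlow⟩, rfl⟩)
    · rw [pvCnt_cons_neg hs] at hpos ⊢
      exact Or.inr (ih hpos)

set_option maxRecDepth 8192 in
lemma alpha_eq_range : pvAlpha = (List.range 26).map (fun k => Char.ofNat (97 + k)) := by
  decide

lemma alpha_low : ∀ c ∈ pvAlpha, pvLow c = true := by
  intro c hc
  rw [alpha_eq_range, List.mem_map] at hc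
  obtain ⟨k, hk, rfl⟩ := hc
  rw [List.mem_range] at hk
  interval_cases k <;> decide

lemma low_bounds {c : Char} (h : pvLow c = true) : 97 ≤ c.toNat ∧ c.toNat ≤ 122 := by
  unfold pvLow at h
  rw [Bool.and_eq_true, beq_iff_eq] at h
  obtain ⟨heq, hal⟩ := h
  unfold PySem.Chars.isalpha at hal
  rw [Bool.or_eq_true] at hal
  rcases hal with hu | hl
  · exfalso
    have hAZ : 'A' ≤ c ∧ c ≤ 'Z' := by
      unfold PySem.Chars.isupper at hu
      rw [Bool.and_eq_true, decide_eq_true_eq, decide_eq_true_eq] at hu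
      exact hu
    have h65 : 65 ≤ c.toNat := hAZ.1
    have h90 : c.toNat ≤ 90 := hAZ.2
    unfold PySem.Chars.lowerChar at heq
    rw [if_pos (by unfold PySem.Chars.isupper
                   rw [Bool.and_eq_true, decide_eq_true_eq, decide_eq_true_eq]
                   exact hAZ)] at heq
    have hval : Nat.isValidChar (c.toNat + 32) := Or.inl (by omega)
    have ht : (Char.ofNat (c.toNat + 32)).toNat = c.toNat + 32 := by
      rw [Char.toNat_ofNat, if_pos hval]
    have hc := congrArg Char.toNat heq
    omega
  · have hb : 'a' ≤ c ∧ c ≤ 'z' := by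
      unfold PySem.Chars.islower at hl
      rw [Bool.and_eq_true, decide_eq_true_eq, decide_eq_true_eq] at hl
      exact hl
    exact ⟨hb.1, hb.2⟩

lemma mem_alpha_of_bounds {c : Char} (h1 : 97 ≤ c.toNat) (h2 : c.toNat ≤ 122) :
    c ∈ pvAlpha := by
  rw [alpha_eq_range, List.mem_map]
  refine ⟨c.toNat - 97, List.mem_range.mpr (by omega), ?_⟩
  have h3 : 97 + (c.toNat - 97) = c.toNat := by omega
  rw [h3, Char.ofNat_toNat]

lemma memB {l : List String} {x : Int × Char} (hx : x ∈ pvCandB l) :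
    pvLow x.2 = true ∧ 0 < pvCnt l x.2 ∧ x = (pvCnt l x.2, x.2) := by
  obtain ⟨c, hc, rfl⟩ := List.mem_map.mp hx
  obtain ⟨hca, hcp⟩ := List.mem_filter.mp hc
  exact ⟨alpha_low c hca, of_decide_eq_true hcp, rfl⟩

lemma occ_memB {l : List String} {c : Char} (hlow : pvLow c = true)
    (hpos : 0 < pvCnt l c) : (pvCnt l c, c) ∈ pvCandB l := by
  refine List.mem_map.mpr ⟨c, List.mem_filter.mpr ⟨?_, decide_eq_true hpos⟩, rfl⟩
  obtain ⟨h1, h2⟩ := low_bounds hlow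
  exact mem_alpha_of_bounds h1 h2

-- ---- A's port equals the fold of pvCandA ----

lemma pred_find_eq_isIn (c : Char) (s2 : String) :
    (PySem.Str.find s2 (String.singleton c) != -1) = PySem.Str.isIn (String.singleton c) s2 := by
  by_cases h : PySem.Str.isIn (String.singleton c) s2 = true
  · have h1 : PySem.Str.find s2 (String.singleton c) ≠ -1 :=
      (PySem.Str.find_ne_neg_one_iff _ _).mpr ((PySem.Str.isIn_iff_infix _ _).mp h)
    rw [h]
    exact bne_iff_ne.mpr h1
  · have h0 : PySem.Str.isIn (String.singleton c) s2 = false := Bool.eq_false_iff.mpr h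
    have h1 : PySem.Str.find s2 (String.singleton c) = -1 := by
      by_contra hne
      exact h ((PySem.Str.isIn_iff_infix _ _).mpr ((PySem.Str.find_ne_neg_one_iff _ _).mp hne))
    rw [h0, h1]
    rfl

lemma stepA_eq (st q : Int × Char) :
    (if q.1 > st.1 then q else if q.1 == st.1 && q.2 > st.2 then q else st) = pvMax st q := by
  by_cases h1 : st.1 < q.1
  · simp [pvMax, h1]
  · by_cases h2 : q.1 = st.1 <;> by_cases h3 : st.2 < q.2 <;>
      simp [pvMax, h1, h2, h3]

lemma occ_fold_eq {l pre : List String} {s : String} {rest : List String}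
    (hl : l = pre ++ s :: rest) (c : Char) :
    (PySem.List.pyRange (pre.length : Int) (PySem.List.len l)).foldl
      (fun (occ : Int) k =>
        let appo2 := PySem.List.pyGetD l k ""
        if PySem.Str.find appo2 (String.singleton c) != -1 then occ + 1 else occ)
      (0 + 1) = 1 + pvCnt (s :: rest) c := by
  rw [show (fun (occ : Int) k =>
        let appo2 := PySem.List.pyGetD l k ""
        if PySem.Str.find appo2 (String.singleton c) != -1 then occ + 1 else occ)
      = (fun (occ : Int) k =>
          if PySem.Str.find (PySem.List.pyGetD l k "") (String.singleton c) != -1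
          then occ + 1 else occ) from rfl]
  rw [PySem.List.foldl_pyRange_pyGetD l ""
        (fun (occ : Int) s2 => if PySem.Str.find s2 (String.singleton c) != -1 then occ + 1 else occ)
        (0 + 1) (Int.natCast_nonneg _)]
  rw [Int.toNat_natCast, hl, List.drop_left]
  rw [PySem.List.foldl_if_add_one]
  have hcp : (s :: rest).countP (fun s2 => PySem.Str.find s2 (String.singleton c) != -1)
      = (s :: rest).countP (fun s2 => PySem.Str.isIn (String.singleton c) s2) :=
    List.countP_congr (fun s2 _ => by rw [pred_find_eq_isIn c s2])
  rw [hcp]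
  unfold pvCnt
  omega

lemma charbody_eq {l pre : List String} {s : String} {rest : List String}
    (hl : l = pre ++ s :: rest) (st : Int × Char) (cj : Char) :
    (if cj == PySem.Chars.lowerChar cj && PySem.Chars.isalpha cj then
       (let occ : Int :=
          (PySem.List.pyRange (pre.length : Int) (PySem.List.len l)).foldl
            (fun (occ : Int) k =>
              let appo2 := PySem.List.pyGetD l k ""
              if PySem.Str.find appo2 (String.singleton cj) != -1 then occ + 1 else occ)
            (0 + 1)
        if occ > st.1 then (occ, cj)
        else if occ == st.1 && cj > st.2 then (occ, cj)
        else st)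
     else st) = pvStep (s :: rest) st cj := by
  by_cases hc : (cj == PySem.Chars.lowerChar cj && PySem.Chars.isalpha cj) = true
  · have hlow : pvLow cj = true := hc
    have hR : pvStep (s :: rest) st cj = pvMax st (1 + pvCnt (s :: rest) cj, cj) := by
      unfold pvStep
      rw [if_pos hlow]
    rw [hR, if_pos hc, occ_fold_eq hl cj]
    exact stepA_eq st (1 + pvCnt (s :: rest) cj, cj)
  · have hlow : ¬ pvLow cj = true := hc
    rw [if_neg hc]
    unfold pvStep
    rw [if_neg hlow]

lemma pyRange_self_nil (a : Int) : PySem.List.pyRange a a = [] := by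
  rw [List.eq_nil_iff_forall_not_mem]
  intro x hx
  rw [PySem.List.mem_pyRange_one] at hx
  omega

lemma body_eq {l pre : List String} {s : String} {rest : List String}
    (hl : l = pre ++ s :: rest) (st : Int × Char) :
    A_Ex1_body l st (pre.length : Int) = s.toList.foldl (pvStep (s :: rest)) st := by
  have happo : PySem.List.pyGetD l (pre.length : Int) "" = s := by
    rw [hl]
    simp [PySem.List.pyGetD]
  unfold A_Ex1_body
  simp only [happo]
  rw [PySem.List.foldl_pyRange_zero_pyGetD s.toList ' '
      (fun (st : Int × Char) cj =>
        if cj == PySem.Chars.lowerChar cj && PySem.Chars.isalpha cj then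
          (let occ : Int :=
             (PySem.List.pyRange (pre.length : Int) (PySem.List.len l)).foldl
               (fun (occ : Int) k =>
                 let appo2 := PySem.List.pyGetD l k ""
                 if PySem.Str.find appo2 (String.singleton cj) != -1 then occ + 1 else occ)
               (0 + 1)
           if occ > st.1 then (occ, cj)
           else if occ == st.1 && cj > st.2 then (occ, cj)
           else st)
        else st) st]
  exact PySem.List.foldl_congr_mem s.toList _ _ st (fun acc cj hmem => charbody_eq hl acc cj)

lemma outer_eq (l : List String) :
    ∀ (suf pre : List String) (st : Int × Char), l = pre ++ suf →
      (PySem.List.pyRange (pre.length : Int) (PySem.List.len l)).foldl (A_Ex1_body l) st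
        = pvProcA suf st := by
  intro suf
  induction suf with
  | nil =>
    intro pre st hl
    have hlen : PySem.List.len l = (pre.length : Int) := by
      unfold PySem.List.len
      rw [hl, List.append_nil]
    rw [hlen, pyRange_self_nil]
    rfl
  | cons s rest ih =>
    intro pre st hl
    have hlt : (pre.length : Int) < PySem.List.len l := by
      unfold PySem.List.len
      rw [hl]
      simp only [List.length_append, List.length_cons]
      push_cast
      omega
    rw [PySem.List.pyRange_one_cons hlt, List.foldl_cons]
    rw [body_eq hl st]
    have hlen : ((pre.length : Int) + 1) = (((pre ++ [s]).length : Nat) : Int) := by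
      simp only [List.length_append, List.length_singleton]
      push_cast
      omega
    rw [hlen]
    rw [ih (pre ++ [s]) (s.toList.foldl (pvStep (s :: rest)) st) (by rw [hl]; simp)]
    rfl

lemma procA_eq_candA (l : List String) (st : Int × Char) :
    pvProcA l st = (pvCandA l).foldl pvMax st := by
  induction l generalizing st with
  | nil => rfl
  | cons s rest ih =>
    rw [pvProcA, pvCandA, List.foldl_append, ih]
    congr 1
    have h2 : List.foldl (pvStep (s :: rest)) st s.toList
        = List.foldl (fun (st : Int × Char) c => pvMax st (1 + pvCnt (s :: rest) c, c)) st
            (s.toList.filter pvLow) :=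
      PySem.List.foldl_if_eq_foldl_filter pvLow
        (fun (st : Int × Char) c => pvMax st (1 + pvCnt (s :: rest) c, c)) s.toList st
    rw [h2]
    exact (List.foldl_map (f := fun c => ((1 + pvCnt (s :: rest) c, c) : Int × Char))
      (g := pvMax)).symm

lemma A_eq (l : List String) :
    A_Ex1 l = String.singleton (((pvCandA l).foldl pvMax ((0 : Int), 'a')).2) := by
  unfold A_Ex1
  have h := outer_eq l l [] ((0 : Int), 'a') rfl
  simp only [List.length_nil, Nat.cast_zero] at h
  rw [h, procA_eq_candA]

-- ---- B's port equals the fold of pvCandB ----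

lemma stepB_eq (l : List String) (best : Int × Char) (c : Char) :
    (let n : Int :=
       l.foldl (fun (n : Int) s => if PySem.Str.isIn (String.singleton c) s then n + 1 else n) 0
     if n > 0 && (n > best.1 || (n == best.1 && c > best.2)) then (n, c) else best)
      = if decide (0 < pvCnt l c) = true then pvMax best (pvCnt l c, c) else best := by
  have hn : l.foldl (fun (n : Int) s => if PySem.Str.isIn (String.singleton c) s then n + 1 else n) 0
      = pvCnt l c := by
    rw [PySem.List.foldl_if_add_one]
    unfold pvCnt
    simp only [zero_add]
  simp only [hn]
  by_cases h : 0 < pvCnt l c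
  · by_cases h1 : best.1 < pvCnt l c <;> by_cases h2 : pvCnt l c = best.1 <;>
      by_cases h3 : best.2 < c <;> simp [pvMax, h, h1, h2, h3]
  · simp [h]

lemma B_eq (l : List String) :
    A_Ex1_alt l = String.singleton (((pvCandB l).foldl pvMax ((0 : Int), 'a')).2) := by
  unfold A_Ex1_alt
  simp only
  have hstep : (fun (best : Int × Char) c =>
      (let n : Int :=
         l.foldl (fun (n : Int) s => if PySem.Str.isIn (String.singleton c) s then n + 1 else n) 0
       if n > 0 && (n > best.1 || (n == best.1 && c > best.2)) then (n, c) else best))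
      = fun (best : Int × Char) c =>
          if decide (0 < pvCnt l c) = true then pvMax best (pvCnt l c, c) else best := by
    funext best c
    exact stepB_eq l best c
  rw [hstep]
  rw [PySem.List.foldl_if_eq_foldl_filter (fun c => decide (0 < pvCnt l c))
      (fun (best : Int × Char) c => pvMax best (pvCnt l c, c)) _ _]
  rw [show "abcdefghijklmnopqrstuvwxyz".toList = pvAlpha from rfl]
  rw [← List.foldl_map (f := fun c => (pvCnt l c, c)) (g := pvMax)]
  rfl

-- ---- the two maxima coincide ----

lemma pvLe_shift {a b : Int} {c d : Char} (h : pvLe (1 + a, c) (1 + b, d)) :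
    pvLe (a, c) (b, d) := by
  rcases h with h | ⟨h, h'⟩
  · exact Or.inl (by simp at h ⊢; omega)
  · exact Or.inr ⟨by simp at h ⊢; omega, h'⟩

lemma final_eq (l : List String) :
    ((pvCandA l).foldl pvMax ((0 : Int), 'a')).2
      = ((pvCandB l).foldl pvMax ((0 : Int), 'a')).2 := by
  by_cases hex : ∃ c, pvLow c = true ∧ 0 < pvCnt l c
  · obtain ⟨c0, hc0l, hc0p⟩ := hex
    -- A's fold lands in pvCandA
    have hA0 : pvLe (1 + pvCnt l c0, c0) ((pvCandA l).foldl pvMax ((0 : Int), 'a')) :=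
      foldl_pvMax_le_mem (occ_memA hc0l hc0p) _
    have hAmem : (pvCandA l).foldl pvMax ((0 : Int), 'a') ∈ pvCandA l := by
      rcases foldl_pvMax_mem (pvCandA l) ((0 : Int), 'a') with h | h
      · exfalso
        rw [h] at hA0
        have hnn := pvCnt_nonneg l c0
        rcases hA0 with h' | ⟨h', _⟩ <;> simp at h' <;> omega
      · exact h
    obtain ⟨hAlow, hApos, hA1, hA2⟩ := memA hAmem
    set rA := (pvCandA l).foldl pvMax ((0 : Int), 'a') with hrA
    -- rA is exactly (1 + cnt a, a)
    have hAx : pvLe (1 + pvCnt l rA.2, rA.2) rA := foldl_pvMax_le_mem (occ_memA hAlow hApos) _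
    have hrAeq : rA = (1 + pvCnt l rA.2, rA.2) := by
      rcases hAx with h | ⟨h, _⟩
      · exfalso; simp at h; omega
      · exact Prod.ext (by simp at h ⊢; omega) rfl
    -- B's fold lands in pvCandB
    have hB0 : pvLe (pvCnt l c0, c0) ((pvCandB l).foldl pvMax ((0 : Int), 'a')) :=
      foldl_pvMax_le_mem (occ_memB hc0l hc0p) _
    have hBmem : (pvCandB l).foldl pvMax ((0 : Int), 'a') ∈ pvCandB l := by
      rcases foldl_pvMax_mem (pvCandB l) ((0 : Int), 'a') with h | h
      · exfalso
        rw [h] at hB0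
        rcases hB0 with h' | ⟨h', _⟩ <;> simp at h' <;> omega
      · exact h
    obtain ⟨hBlow, hBpos, hBeq⟩ := memB hBmem
    set rB := (pvCandB l).foldl pvMax ((0 : Int), 'a') with hrB
    -- cross bounds
    have h1 : pvLe (1 + pvCnt l rB.2, rB.2) rA := foldl_pvMax_le_mem (occ_memA hBlow hBpos) _
    have h2 : pvLe (pvCnt l rA.2, rA.2) rB := foldl_pvMax_le_mem (occ_memB hAlow hApos) _
    rw [hrAeq] at h1
    rw [hBeq] at h2
    have h1' : pvLe (pvCnt l rB.2, rB.2) (pvCnt l rA.2, rA.2) := pvLe_shift h1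
    have hfin := pvLe_antisymm h1' h2
    exact (congrArg Prod.snd hfin).symm
  · have hA : pvCandA l = [] := by
      rw [List.eq_nil_iff_forall_not_mem]
      intro x hx
      obtain ⟨h1, h2, _, _⟩ := memA hx
      exact hex ⟨x.2, h1, h2⟩
    have hB : pvCandB l = [] := by
      rw [List.eq_nil_iff_forall_not_mem]
      intro x hx
      obtain ⟨h1, h2, _⟩ := memB hx
      exact hex ⟨x.2, h1, h2⟩
    rw [hA, hB]

-- ===== VERDICT (by name: the statement is the Claim_ definition above) =====
theorem A_Ex1_spec : Claim_equal_A_Ex1 := by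
  intro l _
  unfold Spec_A_Ex1
  rw [A_eq, B_eq, final_eq]
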